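-- pv_equiv track=rewrite | github.com/danielsupercoollikeme/Leetcode | Leetcodereversebits.py | solution_myself
-- ===== SOURCE A (Python) =====
-- def solution_myself(n):
--     n = int(str(n)[::-1])
--     decimal = 0
--     i = 0
--     while n != 0:
--         dec = n % 10
--         decimal = decimal + dec * pow(2, i)
--         n = n // 10
--         i += 1
--     return decimal
-- ===== SOURCE B (Python) =====
-- def solution_myself(n):
--     # Pure arithmetic Horner loop over the decimal digits of n, least significant first.
--     # Processing d = n % 10 with res = res * 2 + d ends up weighting the decimal
--     # digit at string position i (from the most significant end) by 2**i, which is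
--     # exactly what A computes after reversing and re-parsing the decimal string.
--     res = 0
--     m = n
--     while m > 0:
--         res = res * 2 + m % 10
--         m //= 10
--     return res
-- ===== Notes on version B (the rewrite author's own statement) =====
-- stated objective: simpler
-- what changed: B drops A's build-string/reverse/re-parse round-trip entirely and runs one plain arithmetic Horner loop over the decimal digits of n (res = res*2 + n%10; n //= 10), which assigns each digit the same power-of-two weight A obtains by reversing the decimal string, re-parsing it with int() and scanning the parsed value digit by digit.
import Mathlib
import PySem

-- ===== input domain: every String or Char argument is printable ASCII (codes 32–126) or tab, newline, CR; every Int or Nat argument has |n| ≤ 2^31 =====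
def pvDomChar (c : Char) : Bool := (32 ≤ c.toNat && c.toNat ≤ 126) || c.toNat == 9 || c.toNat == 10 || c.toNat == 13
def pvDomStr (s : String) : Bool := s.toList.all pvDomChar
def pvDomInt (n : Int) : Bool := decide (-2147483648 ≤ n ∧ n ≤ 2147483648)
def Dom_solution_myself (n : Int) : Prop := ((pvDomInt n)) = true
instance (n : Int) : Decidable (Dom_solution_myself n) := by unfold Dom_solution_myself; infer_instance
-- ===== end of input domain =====

-- B replaces A's build-string/reverse/re-parse round-trip by a single arithmetic
-- Horner loop over the decimal digits of n (objective: simpler).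

-- ===== PORT A =====
-- while n != 0: dec = n % 10; decimal += dec * 2**i; n //= 10; i += 1
-- (the loop only ever runs on the nonnegative value produced by int(); the
--  `m ≤ 0` guard is a termination guard for that unreachable region)
def solA_loop (m decimal : Int) (i : Nat) : Int :=
  if m = 0 then decimal
  else if m ≤ 0 then decimal
  else solA_loop (PySem.Int.floordiv m 10) (decimal + PySem.Int.mod m 10 * 2 ^ i) (i + 1)
termination_by m.toNat
decreasing_by
  rename_i _ h2
  rw [PySem.Int.floordiv_eq_ediv_of_pos (by omega : (0:Int) < 10)]
  omega

def solution_myself (n : Int) : Int :=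
  -- n = int(str(n)[::-1])  then the digit loop
  match PySem.Str.slice? (PySem.Int.toStr n) none none (-1) with
  | none => 0      -- unreachable: a slice with step -1 never raises
  | some rev =>
    match PySem.Int.ofStr? rev with
    | none => 0    -- int() raises ValueError here (n < 0); excluded by Pre_
    | some m => solA_loop m 0 0

-- ===== PORT B =====
-- res = 0; while m > 0: res = res * 2 + m % 10; m //= 10
def altLoop (m res : Int) : Int :=
  if 0 < m then altLoop (PySem.Int.floordiv m 10) (res * 2 + PySem.Int.mod m 10) else res
termination_by m.toNat
decreasing_by
  rename_i h1
  rw [PySem.Int.floordiv_eq_ediv_of_pos (by omega : (0:Int) < 10)]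
  omega

def solution_myself_alt (n : Int) : Int := altLoop n 0

-- ===== PRECONDITION & SPEC =====
-- Pre_ excludes n < 0, on which A raises ValueError: str(n)[::-1] ends with '-'
-- and int() rejects it.
def Pre_solution_myself (n : Int) : Prop := 0 ≤ n
instance (n : Int) : Decidable (Pre_solution_myself n) := by unfold Pre_solution_myself; infer_instance
def pvWitness_solution_myself : Int := (19)

def Spec_solution_myself (n : Int) (out : Int) : Prop := out = solution_myself_alt n
instance (n : Int) (out : Int) : Decidable (Spec_solution_myself n out) := by unfold Spec_solution_myself; infer_instance

-- ===== CLAIM (what is proved, stated in full; the proofs are below) =====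
def Claim_equal_solution_myself : Prop := ∀ (n : Int), Dom_solution_myself n → Pre_solution_myself n → Spec_solution_myself n (solution_myself n)

-- ===== LEMMAS AND PROOFS =====

-- value of one decimal digit character
def pvDv (c : Char) : Nat := c.toNat - '0'.toNat
-- decimal value of a digit string, most significant character first
def pvV (ds : List Char) : Nat := ds.foldl (fun a c => a * 10 + pvDv c) 0
-- the common specification: digit at distance i from the HEAD weighted by 2^i
def pvW (ds : List Char) : Int := ds.foldr (fun c a => (pvDv c : Int) + 2 * a) 0
-- what A's digit loop computes from the parsed value, as a function of that value
def pvG (v : Nat) : Int :=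
  if v = 0 then 0 else ((v % 10 : Nat) : Int) + 2 * pvG (v / 10)
termination_by v
decreasing_by omega

-- capture of the (private) digit-parser inside PySem.Int.ofChars?, together with
-- its one-step definitional unfoldings; every component holds by rfl
theorem pvCapture : ∃ g : List Char → Bool → Nat → Option Nat,
    (∀ cs : List Char, PySem.Int.ofChars? cs =
      match (List.dropWhile PySem.Int.isIntSpace (List.dropWhile PySem.Int.isIntSpace cs).reverse).reverse with
      | '-' :: ds => Option.map (fun n => -n) (do let a ← (match ds with | [] => none | cs' => g cs' false 0); pure ((a : Nat) : Int))
      | '+' :: ds => Option.map (fun n => n) (do let a ← (match ds with | [] => none | cs' => g cs' false 0); pure ((a : Nat) : Int))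
      | ds => Option.map (fun n => n) (do let a ← (match ds with | [] => none | cs' => g cs' false 0); pure ((a : Nat) : Int)))
    ∧ (∀ b a, g [] b a = if b = true then some a else none)
    ∧ (∀ c rest b a, g (c :: rest) b a =
        if c.isDigit = true then g rest true (a * 10 + (c.toNat - '0'.toNat))
        else
          if c = '_' ∧ b = true then
            match rest with
            | d :: _ => if d.isDigit = true then g rest false a else none
            | [] => none
          else none) :=
  ⟨_, fun _ => rfl, fun _ _ => rfl, fun _ _ _ _ => rfl⟩

theorem pv_isIntSpace_false {c : Char} (h : c.isDigit = true) :
    PySem.Int.isIntSpace c = false := by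
  simp only [PySem.Int.isIntSpace, Bool.or_eq_false_iff, decide_eq_false_iff_not]
  refine ⟨⟨⟨⟨⟨?_, ?_⟩, ?_⟩, ?_⟩, ?_⟩, ?_⟩ <;> (intro hc; subst hc; exact absurd h (by decide))

theorem pv_dropWhile_id {ds : List Char} (h : ∀ c ∈ ds, c.isDigit = true) :
    List.dropWhile PySem.Int.isIntSpace ds = ds := by
  cases ds with
  | nil => rfl
  | cons c t =>
      rw [List.dropWhile_cons_of_neg]
      simp [pv_isIntSpace_false (h c (by simp))]

theorem pv_dv_le {c : Char} (h : c.isDigit = true) : pvDv c ≤ 9 := by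
  simp only [Char.isDigit, Bool.and_eq_true, decide_eq_true_eq] at h
  have h2 := UInt32.le_iff_toNat_le.mp h.2
  have h9 : ('9').val.toNat = 57 := by decide
  rw [h9] at h2
  have h0 : pvDv c = c.val.toNat - 48 := rfl
  rw [h0]
  omega

-- PARSE: int() on a nonempty pure-digit string returns its decimal value
theorem pv_ofChars_digits (ds : List Char) (hd : ∀ c ∈ ds, c.isDigit = true)
    (hne : ds ≠ []) : PySem.Int.ofChars? ds = some ((pvV ds : Nat) : Int) := by
  obtain ⟨g, hconn, hnil, hcons⟩ := pvCapture
  have inv : ∀ t : List Char, (∀ c ∈ t, c.isDigit = true) → ∀ acc : Nat,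
      g t true acc = some (t.foldl (fun a c => a * 10 + pvDv c) acc) := by
    intro t
    induction t with
    | nil => intro _ acc; rw [hnil]; rfl
    | cons c r ih =>
        intro hdig acc
        rw [hcons, if_pos (hdig c (by simp))]
        exact ih (fun x hx => hdig x (by simp [hx])) _
  have hrev : ∀ c ∈ ds.reverse, c.isDigit = true := by
    intro c hc; exact hd c (List.mem_reverse.mp hc)
  rw [hconn, pv_dropWhile_id hd, pv_dropWhile_id hrev, List.reverse_reverse]
  rcases ds with _ | ⟨c, t⟩
  · exact absurd rfl hne
  · have hc : c.isDigit = true := hd c (by simp)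
    have ht : ∀ x ∈ t, x.isDigit = true := fun x hx => hd x (by simp [hx])
    split
    · rename_i heq
      rw [List.cons.injEq] at heq
      exact absurd hc (by rw [heq.1]; decide)
    · rename_i heq
      rw [List.cons.injEq] at heq
      exact absurd hc (by rw [heq.1]; decide)
    · -- catch-all branch: the scrutinee is our digit list
      have : g (c :: t) false 0 = some (pvV (c :: t)) := by
        rw [hcons, if_pos hc, inv t ht]
        rfl
      simp [this]

-- pvG satisfies its digit recurrence at every value (including 0)
theorem pvG_eq (v : Nat) : pvG v = ((v % 10 : Nat) : Int) + 2 * pvG (v / 10) := by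
  by_cases h : v = 0
  · subst h
    rw [pvG]
    norm_num
  · rw [pvG]; simp [h]

-- A's loop computes pvG of the parsed value
theorem pv_solA_loop (v : Nat) : ∀ (d : Int) (i : Nat),
    solA_loop (v : Int) d i = d + pvG v * 2 ^ i := by
  induction v using Nat.strong_induction_on with
  | _ v ih =>
      intro d i
      by_cases h : v = 0
      · subst h
        rw [solA_loop]
        simp
        rw [pvG]
        simp
      · have hfd : PySem.Int.floordiv ((v : Nat) : Int) 10 = ((v / 10 : Nat) : Int) := by
          exact_mod_cast PySem.Int.floordiv_natCast v 10
        have hmd : PySem.Int.mod ((v : Nat) : Int) 10 = ((v % 10 : Nat) : Int) := by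
          exact_mod_cast PySem.Int.mod_natCast v 10
        rw [solA_loop, if_neg (by exact_mod_cast h), if_neg (by omega), hfd, hmd,
            ih (v / 10) (by omega), pvG_eq v]
        ring

-- bridge: A's value function of the reversed-string parse IS the 2^i-weighted sum
theorem pv_bridge (ds : List Char) (hd : ∀ c ∈ ds, c.isDigit = true) :
    pvG (pvV ds.reverse) = pvW ds := by
  induction ds with
  | nil => rw [pvG]; rfl
  | cons c t ih =>
      have hc : pvDv c ≤ 9 := pv_dv_le (hd c (by simp))
      have hv : pvV (c :: t).reverse = pvV t.reverse * 10 + pvDv c := by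
        simp [pvV, List.foldl_append]
      rw [hv, pvG_eq]
      have h1 : (pvV t.reverse * 10 + pvDv c) % 10 = pvDv c := by omega
      have h2 : (pvV t.reverse * 10 + pvDv c) / 10 = pvV t.reverse := by omega
      rw [h1, h2, ih (fun x hx => hd x (by simp [hx]))]
      simp [pvW]

theorem pv_dv_digitChar (d : Nat) (h : d < 10) : pvDv d.digitChar = d := by
  interval_cases d <;> decide

theorem pv_pvW_append (ds : List Char) (c : Char) :
    pvW (ds ++ [c]) = pvW ds + (pvDv c : Int) * 2 ^ ds.length := by
  induction ds with
  | nil => simp [pvW]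
  | cons d t ih =>
      simp only [List.cons_append, pvW, List.foldr_cons] at *
      rw [ih]
      simp [List.length_cons]
      ring

-- B's loop computes the same weighted sum over the decimal digit string
theorem pv_altLoop (v : Nat) : 0 < v → ∀ res : Int,
    altLoop (v : Int) res = res * 2 ^ (Nat.toDigits 10 v).length + pvW (Nat.toDigits 10 v) := by
  induction v using Nat.strong_induction_on with
  | _ v ih =>
      intro hv res
      have hfd : PySem.Int.floordiv ((v : Nat) : Int) 10 = ((v / 10 : Nat) : Int) := by
        exact_mod_cast PySem.Int.floordiv_natCast v 10
      have hmd : PySem.Int.mod ((v : Nat) : Int) 10 = ((v % 10 : Nat) : Int) := by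
        exact_mod_cast PySem.Int.mod_natCast v 10
      rw [altLoop, if_pos (by exact_mod_cast hv), hfd, hmd]
      by_cases h10 : v < 10
      · have hdiv : v / 10 = 0 := by omega
        rw [Nat.mod_eq_of_lt h10]
        rw [hdiv, altLoop, if_neg (by omega), Nat.toDigits_of_lt_base h10]
        simp [pvW, pv_dv_digitChar v h10]
      · have hpos : 0 < v / 10 := by omega
        rw [ih (v / 10) (by omega) hpos (res * 2 + ((v % 10 : Nat) : Int)),
            Nat.toDigits_eq_if (n := v) (by omega : 1 < 10), if_neg h10,
            pv_pvW_append, List.length_append, pv_dv_digitChar (v % 10) (by omega)]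
        simp [List.length_cons]
        ring

-- assembling A: for 0 ≤ n, A literally computes pvG of the parse of the reversed digits
theorem pv_A_eval (n : Int) (hn : 0 ≤ n) :
    solution_myself n = pvG (pvV (Nat.toDigits 10 n.toNat).reverse) := by
  have htc : PySem.Int.toChars n = Nat.toDigits 10 n.toNat := by
    simp [PySem.Int.toChars, not_lt.mpr hn]
  have hdig : ∀ c ∈ (Nat.toDigits 10 n.toNat).reverse, c.isDigit = true := by
    intro c hc
    exact Nat.isDigit_of_mem_toDigits (by omega) (by omega) (List.mem_reverse.mp hc)
  have hne : (Nat.toDigits 10 n.toNat).reverse ≠ [] := by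
    simp only [ne_eq, List.reverse_eq_nil_iff]
    intro h
    have := @Nat.length_toDigits_pos 10 n.toNat
    rw [h] at this; simp at this
  unfold solution_myself
  rw [PySem.Str.slice?_none_none_neg_one]
  simp only []
  rw [PySem.Int.toList_toStr, htc, PySem.Int.ofStr?_ofList,
      pv_ofChars_digits _ hdig hne]
  simp only []
  rw [pv_solA_loop]
  simp

-- ===== VERDICT (by name: the statement is the Claim_ definition above) =====
theorem solution_myself_spec : Claim_equal_solution_myself := by
  intro n hdom hpre
  unfold Spec_solution_myself
  have hn : ((n.toNat : Nat) : Int) = n := Int.toNat_of_nonneg hpre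
  have hA : solution_myself n = pvW (Nat.toDigits 10 n.toNat) := by
    rw [pv_A_eval n hpre, pv_bridge]
    intro c hc
    exact Nat.isDigit_of_mem_toDigits (by omega) (by omega) hc
  by_cases h0 : n.toNat = 0
  · have hz : n = 0 := by omega
    subst hz
    rw [hA]
    unfold solution_myself_alt
    rw [altLoop, if_neg (by omega)]
    simp only [Int.toNat_zero] at *
    rw [Nat.toDigits_of_lt_base (by omega : 0 < 10)]
    simp [pvW, pvDv]
  · rw [hA]
    unfold solution_myself_alt
    have hswap : altLoop n 0 = altLoop ((n.toNat : Nat) : Int) 0 := by rw [hn]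
    rw [hswap, pv_altLoop n.toNat (by omega) 0]
    simp
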